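-- pv_equiv track=rewrite | github.com/darkneeed/mobguard-panel | api/main.py | _normalize_runtime_settings
-- ===== SOURCE A (Python) =====
-- from typing import Any, Optional
--
-- def _normalize_runtime_settings(config: dict[str, Any], defaults: dict[str, Any], aliases: Optional[dict[str, str]] = None) -> dict[str, Any]:
--     aliases = aliases or {}
--     settings = config.get("settings", {})
--     normalized: dict[str, Any] = {}
--     for key, default in defaults.items():
--         if key in settings:
--             normalized[key] = settings[key]
--             continue
--         alias_candidates = [legacy for legacy, canonical in aliases.items() if canonical == key]
--         alias_value = next((settings.get(alias) for alias in alias_candidates if alias in settings), default)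
--         normalized[key] = alias_value
--     return normalized
-- ===== SOURCE B (Python) =====
-- from typing import Any, Optional
--
-- def _normalize_runtime_settings(config: dict, defaults: dict, aliases: Optional[dict] = None) -> dict:
--     settings = config.get("settings", {})
--     normalized = dict(defaults)
--     for legacy, canonical in reversed(list((aliases or {}).items())):
--         if canonical in defaults and legacy in settings:
--             normalized[canonical] = settings[legacy]
--     for key in defaults:
--         if key in settings:
--             normalized[key] = settings[key]
--     return normalized
-- ===== Notes on version B (the rewrite author's own statement) =====
-- stated objective: alternative
-- what changed: Replaces A's per-default-key scan over all aliases (a nested inner pass building alias_candidates for every key) with a layered overlay: copy defaults, then one reversed pass over aliases overwriting canonical keys (so the first-listed alias wins), then one pass overwriting with direct settings values.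
import Mathlib
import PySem

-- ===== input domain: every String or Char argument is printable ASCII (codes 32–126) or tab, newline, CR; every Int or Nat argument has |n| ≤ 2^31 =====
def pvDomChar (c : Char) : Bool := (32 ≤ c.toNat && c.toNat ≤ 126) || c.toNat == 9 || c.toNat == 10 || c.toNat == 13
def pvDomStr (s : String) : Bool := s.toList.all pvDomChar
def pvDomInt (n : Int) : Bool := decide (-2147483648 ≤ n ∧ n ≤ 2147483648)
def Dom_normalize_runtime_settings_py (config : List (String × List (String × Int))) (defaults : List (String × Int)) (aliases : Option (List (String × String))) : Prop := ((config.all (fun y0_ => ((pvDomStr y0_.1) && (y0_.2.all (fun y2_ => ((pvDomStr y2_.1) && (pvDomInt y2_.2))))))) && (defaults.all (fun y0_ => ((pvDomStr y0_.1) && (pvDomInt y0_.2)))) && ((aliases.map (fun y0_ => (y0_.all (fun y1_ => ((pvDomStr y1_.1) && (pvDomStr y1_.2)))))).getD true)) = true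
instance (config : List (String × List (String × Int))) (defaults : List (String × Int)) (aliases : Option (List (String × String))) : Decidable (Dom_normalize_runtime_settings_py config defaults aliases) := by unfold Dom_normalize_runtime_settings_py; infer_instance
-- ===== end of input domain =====

-- B replaces A's per-key alias scan (a nested pass over aliases for every default key) by a layered
-- overlay: defaults, then one reversed pass over aliases, then one overwrite pass over settings.

-- ===== PORT A =====
def normalize_runtime_settings_py (config : List (String × List (String × Int))) (defaults : List (String × Int)) (aliases : Option (List (String × String))) : List (String × Int) :=
  let al : PySem.Dict String String := PySem.Dict.ofList (aliases.getD [])   -- aliases = aliases or {}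
  let cfg : PySem.Dict String (List (String × Int)) := PySem.Dict.ofList config
  let settings : PySem.Dict String Int := PySem.Dict.ofList (cfg.getD "settings" [])
  let dflts : PySem.Dict String Int := PySem.Dict.ofList defaults
  let normalized : PySem.Dict String Int := dflts.items.foldl (fun acc kv =>
    if settings.contains kv.1 then acc.insert kv.1 (settings.getD kv.1 0)
    else
      let alias_candidates : List String := (al.items.filter (fun p => p.2 == kv.1)).map (·.1)
      let alias_value : Int :=
        (((alias_candidates.filter (fun a => settings.contains a)).head?).map (fun a => settings.getD a 0)).getD kv.2
      acc.insert kv.1 alias_value) PySem.Dict.empty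
  normalized.items

-- ===== PORT B =====
def normalize_runtime_settings_py_alt (config : List (String × List (String × Int))) (defaults : List (String × Int)) (aliases : Option (List (String × String))) : List (String × Int) :=
  let settings : PySem.Dict String Int := PySem.Dict.ofList ((PySem.Dict.ofList config).getD "settings" [])
  let dflts : PySem.Dict String Int := PySem.Dict.ofList defaults
  let al : PySem.Dict String String := PySem.Dict.ofList (aliases.getD [])
  let n1 : PySem.Dict String Int := (al.items.reverse).foldl (fun d p =>
      if dflts.contains p.2 && settings.contains p.1 then d.insert p.2 (settings.getD p.1 0) else d) dflts
  let n2 : PySem.Dict String Int := dflts.keys.foldl (fun d k =>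
      if settings.contains k then d.insert k (settings.getD k 0) else d) n1
  n2.items

-- ===== PRECONDITION & SPEC =====
def Spec_normalize_runtime_settings_py (config : List (String × List (String × Int))) (defaults : List (String × Int)) (aliases : Option (List (String × String))) (out : List (String × Int)) : Prop := out = normalize_runtime_settings_py_alt config defaults aliases
instance (config : List (String × List (String × Int))) (defaults : List (String × Int)) (aliases : Option (List (String × String))) (out : List (String × Int)) : Decidable (Spec_normalize_runtime_settings_py config defaults aliases out) := by unfold Spec_normalize_runtime_settings_py; infer_instance

-- ===== CLAIM (what is proved, stated in full; the proofs are below) =====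
def Claim_equal_normalize_runtime_settings_py : Prop := ∀ (config : List (String × List (String × Int))) (defaults : List (String × Int)) (aliases : Option (List (String × String))), Dom_normalize_runtime_settings_py config defaults aliases → Spec_normalize_runtime_settings_py config defaults aliases (normalize_runtime_settings_py config defaults aliases)

-- ===== LEMMAS AND PROOFS =====

-- Phase-3 loop of B: lookups after the settings-overwrite pass (inserted value depends only on the key).
theorem pv_getD3 (s : PySem.Dict String Int) (l : List String) (d : PySem.Dict String Int) (x : String) :
    (l.foldl (fun d k => if s.contains k then d.insert k (s.getD k 0) else d) d).getD x 0 =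
      if x ∈ l ∧ s.contains x = true then s.getD x 0 else d.getD x 0 := by
  induction l generalizing d with
  | nil => simp
  | cons k l ih =>
    simp only [List.foldl_cons, ih]
    by_cases hxl : x ∈ l ∧ s.contains x = true
    · rw [if_pos hxl, if_pos ⟨List.mem_cons_of_mem _ hxl.1, hxl.2⟩]
    · rw [if_neg hxl]
      by_cases hk : s.contains k = true
      · rw [if_pos hk]
        by_cases hxk : x = k
        · subst hxk
          rw [PySem.Dict.getD_insert, if_pos rfl, if_pos ⟨List.mem_cons_self, hk⟩]
        · rw [PySem.Dict.getD_insert, if_neg hxk,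
            if_neg (by rintro ⟨hm, hcx⟩
                       rcases List.mem_cons.mp hm with h | h
                       · exact hxk h
                       · exact hxl ⟨h, hcx⟩)]
      · rw [if_neg hk,
          if_neg (by rintro ⟨hm, hcx⟩
                     rcases List.mem_cons.mp hm with h | h
                     · exact hk (h ▸ hcx)
                     · exact hxl ⟨h, hcx⟩)]

-- Phase-2 loop of B (aliases processed in reverse, as a foldr): the FIRST matching alias wins.
theorem pv_getD2 (s : PySem.Dict String Int) (df : PySem.Dict String Int)
    (L : List (String × String)) (d : PySem.Dict String Int) (x : String) :
    (L.foldr (fun p d => if df.contains p.2 && s.contains p.1 then d.insert p.2 (s.getD p.1 0) else d) d).getD x 0 =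
      (((L.filter (fun p => p.2 == x && df.contains p.2 && s.contains p.1)).head?).map
        (fun p => s.getD p.1 0)).getD (d.getD x 0) := by
  induction L with
  | nil => simp
  | cons p L ih =>
    simp only [List.foldr_cons, List.filter_cons]
    by_cases hc : (df.contains p.2 && s.contains p.1) = true
    · have hc' : df.contains p.2 = true ∧ s.contains p.1 = true := by simpa using hc
      rw [if_pos hc]
      by_cases hpx : p.2 = x
      · have hfilt : (p.2 == x && df.contains p.2 && s.contains p.1) = true := by
          simp [hpx, hpx ▸ hc'.1, hc'.2]
        rw [if_pos hfilt, PySem.Dict.getD_insert, if_pos hpx.symm]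
        simp
      · rw [if_neg (by simp only [Bool.and_eq_true, beq_iff_eq]
                       rintro ⟨⟨h, _⟩, _⟩; exact hpx h)]
        rw [PySem.Dict.getD_insert, if_neg (fun h => hpx h.symm)]
        exact ih
    · rw [if_neg hc]
      rw [if_neg (by intro h
                     apply hc
                     have h' := h
                     simp only [Bool.and_eq_true] at h'
                     simp [h'.1.2, h'.2])]
      exact ih

-- Keys are preserved by B's phase-2 loop (every insert hits a key already in df = d).
theorem pv_keys2 (s : PySem.Dict String Int) (df : PySem.Dict String Int)
    (L : List (String × String)) (d : PySem.Dict String Int) (hk : d.keys = df.keys) :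
    (L.foldl (fun d p => if df.contains p.2 && s.contains p.1 then d.insert p.2 (s.getD p.1 0) else d) d).keys = df.keys := by
  induction L generalizing d with
  | nil => exact hk
  | cons p L ih =>
    simp only [List.foldl_cons]
    apply ih
    by_cases hc : (df.contains p.2 && s.contains p.1) = true
    · have hc' : df.contains p.2 = true ∧ s.contains p.1 = true := by simpa using hc
      rw [if_pos hc]
      rw [PySem.Dict.keys_insert_of_contains, hk]
      have h2 : p.2 ∈ df.keys := (PySem.Dict.contains_iff_mem_keys df p.2).mp hc'.1
      exact (PySem.Dict.contains_iff_mem_keys d p.2).mpr (hk ▸ h2)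
    · rw [if_neg hc]; exact hk

-- Keys are preserved by B's phase-3 loop (it iterates over keys of df itself).
theorem pv_keys3 (s : PySem.Dict String Int) (K : List String)
    (l : List String) (hl : ∀ k ∈ l, k ∈ K) (d : PySem.Dict String Int) (hk : d.keys = K) :
    (l.foldl (fun d k => if s.contains k then d.insert k (s.getD k 0) else d) d).keys = K := by
  induction l generalizing d with
  | nil => exact hk
  | cons k l ih =>
    simp only [List.foldl_cons]
    apply ih (fun a ha => hl a (List.mem_cons_of_mem _ ha))
    by_cases hc : s.contains k = true
    · rw [if_pos hc]
      rw [PySem.Dict.keys_insert_of_contains, hk]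
      exact (PySem.Dict.contains_iff_mem_keys d k).mpr (hk ▸ hl k List.mem_cons_self)
    · rw [if_neg hc]; exact hk

-- Core equivalence, stated over the decoded dicts.
theorem pv_core (s : PySem.Dict String Int) (df : PySem.Dict String Int)
    (L : List (String × String)) (hnd : df.keys.Nodup) :
    (df.items.foldl (fun acc kv =>
      if s.contains kv.1 then acc.insert kv.1 (s.getD kv.1 0)
      else
        let alias_candidates : List String := (L.filter (fun p => p.2 == kv.1)).map (·.1)
        let alias_value : Int :=
          (((alias_candidates.filter (fun a => s.contains a)).head?).map (fun a => s.getD a 0)).getD kv.2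
        acc.insert kv.1 alias_value) PySem.Dict.empty).items =
    ((df.keys.foldl (fun d k => if s.contains k then d.insert k (s.getD k 0) else d)
      ((L.reverse).foldl (fun d p => if df.contains p.2 && s.contains p.1 then d.insert p.2 (s.getD p.1 0) else d) df)).items) := by
  -- A's fold: one insert per kv, with a value depending only on kv.
  have hfun : (fun (acc : PySem.Dict String Int) (kv : String × Int) =>
      if s.contains kv.1 then acc.insert kv.1 (s.getD kv.1 0)
      else
        let alias_candidates : List String := (L.filter (fun p => p.2 == kv.1)).map (·.1)
        let alias_value : Int :=
          (((alias_candidates.filter (fun a => s.contains a)).head?).map (fun a => s.getD a 0)).getD kv.2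
        acc.insert kv.1 alias_value) =
      (fun acc kv => acc.insert kv.1 (if s.contains kv.1 then s.getD kv.1 0 else
        ((((L.filter (fun p => p.2 == kv.1)).map (·.1)).filter (fun a => s.contains a)).head?.map
          (fun a => s.getD a 0)).getD kv.2)) := by
    funext acc kv
    by_cases h : s.contains kv.1 = true <;> simp [h]
  rw [hfun]
  have hfresh := PySem.Dict.items_foldl_insert_fresh (l := df.items) (k := fun kv => kv.1)
    (v := fun kv => (if s.contains kv.1 then s.getD kv.1 0 else
        ((((L.filter (fun p => p.2 == kv.1)).map (·.1)).filter (fun a => s.contains a)).head?.map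
          (fun a => s.getD a 0)).getD kv.2)) (d := PySem.Dict.empty)
    (by intro a _; simp) (by simpa [PySem.Dict.keys] using hnd)
  rw [hfresh]
  have hemp : (PySem.Dict.empty : PySem.Dict String Int).items = [] := rfl
  rw [hemp, List.nil_append]
  -- B's dict: keys = df.keys, so items are keyed lookups.
  set n1 := (L.reverse).foldl (fun d p => if df.contains p.2 && s.contains p.1 then d.insert p.2 (s.getD p.1 0) else d) df with hn1
  set n2 := df.keys.foldl (fun d k => if s.contains k then d.insert k (s.getD k 0) else d) n1 with hn2
  have hk1 : n1.keys = df.keys := pv_keys2 s df L.reverse df rfl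
  have hk2 : n2.keys = df.keys := pv_keys3 s df.keys df.keys (fun _ h => h) n1 hk1
  have hitems : n2.items = n2.keys.map (fun k => (k, n2.getD k 0)) :=
    PySem.Dict.items_eq_map_keys n2 (hk2 ▸ hnd) 0
  rw [hitems, hk2]
  have hkeys : df.keys = df.items.map (fun kv => kv.1) := rfl
  rw [hkeys, List.map_map]
  apply List.map_congr_left
  intro kv hkv
  have hmem : (kv.1, kv.2) ∈ df.items := by simpa using hkv
  have hdf : df.getD kv.1 0 = kv.2 := PySem.Dict.getD_of_mem_items df hmem hnd 0
  have hkmem : kv.1 ∈ df.keys := PySem.Dict.mem_keys_of_mem_items df hkv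
  have hdfc : df.contains kv.1 = true := (PySem.Dict.contains_iff_mem_keys df kv.1).mpr hkmem
  simp only [Function.comp]
  refine Prod.ext rfl ?_
  show (if s.contains kv.1 = true then s.getD kv.1 0 else _) = n2.getD kv.1 0
  rw [hn2, pv_getD3]
  by_cases hc : s.contains kv.1 = true
  · rw [if_pos hc, if_pos ⟨hkmem, hc⟩]
  · rw [if_neg hc, if_neg (by rintro ⟨_, h⟩; exact hc h)]
    rw [hn1, List.foldl_reverse]
    have h2 := pv_getD2 s df L df kv.1
    rw [h2, hdf]
    -- align A's candidate scan with the filtered alias list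
    have hfm : (((L.filter (fun p => p.2 == kv.1)).map (·.1)).filter (fun a => s.contains a)) =
        (L.filter (fun p => p.2 == kv.1 && s.contains p.1)).map (·.1) := by
      rw [List.filter_map, List.filter_filter]
      refine congrArg _ (List.filter_congr ?_)
      intro p _
      simp only [Function.comp]
      rw [Bool.and_comm]
    have hcongr : (L.filter (fun p => p.2 == kv.1 && s.contains p.1)) =
        (L.filter (fun p => p.2 == kv.1 && df.contains p.2 && s.contains p.1)) := by
      apply List.filter_congr
      intro p _
      by_cases hp : p.2 = kv.1
      · have hb : (p.2 == kv.1) = true := beq_iff_eq.mpr hp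
        rw [hb, hp, hdfc]
        simp
      · have hb : (p.2 == kv.1) = false := beq_eq_false_iff_ne.mpr hp
        rw [hb]
        simp
    rw [hfm, hcongr, List.head?_map, Option.map_map]
    rfl

-- ===== VERDICT (by name: the statement is the Claim_ definition above) =====
theorem normalize_runtime_settings_py_spec : Claim_equal_normalize_runtime_settings_py := by
  intro config defaults aliases _
  show normalize_runtime_settings_py config defaults aliases = normalize_runtime_settings_py_alt config defaults aliases
  unfold normalize_runtime_settings_py normalize_runtime_settings_py_alt
  exact pv_core _ _ _ (PySem.Dict.nodup_keys_ofList defaults)
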